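-- pv_equiv track=rewrite | github.com/splch/zx-motifs | src/zx_motifs/pipeline/phase_poly.py | compute_symmetry_tags_from_pauli_strings
-- ===== SOURCE A (Python) =====
-- def compute_symmetry_tags_from_pauli_strings(
--     pauli_strings: list[str],
-- ) -> dict[str, bool]:
--     """Compute symmetry tags from explicit Pauli strings (e.g. 'XYZZ').
--
--     Handles full Pauli algebra (X, Y, Z, I), not just Z-type gadgets.
--
--     Returns:
--         particle_number_preserving: Each string has equal X and Y count.
--         z2_parity_preserving: Each string has even total Pauli weight.
--         real_valued: No string contains an odd number of Y Paulis.
--     """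
--     particle_preserving = True
--     z2_preserving = True
--     real_valued = True
--
--     for ps in pauli_strings:
--         x_count = ps.count("X")
--         y_count = ps.count("Y")
--         z_count = ps.count("Z")
--         weight = x_count + y_count + z_count
--
--         if x_count != y_count:
--             particle_preserving = False
--         if weight % 2 != 0:
--             z2_preserving = False
--         if y_count % 2 != 0:
--             real_valued = False
--
--     return {
--         "particle_number_preserving": particle_preserving,
--         "z2_parity_preserving": z2_preserving,
--         "real_valued": real_valued,
--     }
-- ===== SOURCE B (Python) =====
-- def _string_tags(ps: str) -> tuple[bool, bool, bool]:
--     """One char-level pass: XY balance, weight parity, Y parity as a state machine."""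
--     balance = 0          # (#X) - (#Y)
--     odd_weight = False   # parity of #X + #Y + #Z
--     odd_y = False        # parity of #Y
--     for c in ps:
--         if c == "X":
--             balance += 1
--             odd_weight = not odd_weight
--         elif c == "Y":
--             balance -= 1
--             odd_weight = not odd_weight
--             odd_y = not odd_y
--         elif c == "Z":
--             odd_weight = not odd_weight
--     return balance == 0, not odd_weight, not odd_y
--
--
-- def compute_symmetry_tags_from_pauli_strings(
--     pauli_strings: list[str],
-- ) -> dict[str, bool]:
--     tags = [_string_tags(ps) for ps in pauli_strings]
--     return {
--         "particle_number_preserving": all(t[0] for t in tags),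
--         "z2_parity_preserving": all(t[1] for t in tags),
--         "real_valued": all(t[2] for t in tags),
--     }
-- ===== Notes on version B (the rewrite author's own statement) =====
-- stated objective: alternative
-- what changed: Replaces the per-string str.count()-and-arithmetic tests with a character-level state machine: one char pass per string maintaining an X−Y balance counter and two parity toggles, materialised as a per-string tag triple list that the three flags are then folded from.
import Mathlib
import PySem

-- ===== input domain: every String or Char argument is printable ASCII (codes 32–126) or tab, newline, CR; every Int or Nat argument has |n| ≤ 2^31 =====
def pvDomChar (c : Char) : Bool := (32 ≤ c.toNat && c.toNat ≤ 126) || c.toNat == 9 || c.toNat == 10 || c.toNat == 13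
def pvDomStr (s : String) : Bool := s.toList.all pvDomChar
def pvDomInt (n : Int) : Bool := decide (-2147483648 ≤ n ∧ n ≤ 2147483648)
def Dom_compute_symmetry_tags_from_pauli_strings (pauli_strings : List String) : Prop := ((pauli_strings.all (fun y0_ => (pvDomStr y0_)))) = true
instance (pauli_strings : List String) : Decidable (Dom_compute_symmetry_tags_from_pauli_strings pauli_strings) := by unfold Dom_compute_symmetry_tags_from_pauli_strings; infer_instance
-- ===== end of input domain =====

-- B replaces A's three str.count scans per string with a single character-level state machine pass per string (alternative decomposition); the proof links both to the same count/parity characterisation.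


-- ===== PORT A =====
-- A's loop body: update (particle, z2, real) from the three counts of one string
def pvStepA (st : Bool × Bool × Bool) (ps : String) : Bool × Bool × Bool :=
  let x_count := PySem.Str.count ps "X"
  let y_count := PySem.Str.count ps "Y"
  let z_count := PySem.Str.count ps "Z"
  let weight := x_count + y_count + z_count
  let particle := if x_count ≠ y_count then false else st.1
  let z2 := if weight % 2 ≠ 0 then false else st.2.1
  let real := if y_count % 2 ≠ 0 then false else st.2.2
  (particle, z2, real)

def compute_symmetry_tags_from_pauli_strings (pauli_strings : List String) : List (String × Bool) :=
  let st := pauli_strings.foldl pvStepA (true, true, true)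
  [("particle_number_preserving", st.1),
   ("z2_parity_preserving", st.2.1),
   ("real_valued", st.2.2)]

-- ===== PORT B =====
-- B's char-level state machine: balance = #X − #Y, plus two parity toggles
def pvCharStep (st : Int × Bool × Bool) (c : Char) : Int × Bool × Bool :=
  if c = 'X' then (st.1 + 1, !st.2.1, st.2.2)
  else if c = 'Y' then (st.1 - 1, !st.2.1, !st.2.2)
  else if c = 'Z' then (st.1, !st.2.1, st.2.2)
  else st

-- B's _string_tags: one pass over the characters of one string
def pvStringTags (ps : String) : Bool × Bool × Bool :=
  let st := ps.toList.foldl pvCharStep (0, false, false)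
  (st.1 == 0, !st.2.1, !st.2.2)

def compute_symmetry_tags_from_pauli_strings_alt (pauli_strings : List String) : List (String × Bool) :=
  let tags := pauli_strings.map pvStringTags
  [("particle_number_preserving", tags.all (fun t => t.1)),
   ("z2_parity_preserving", tags.all (fun t => t.2.1)),
   ("real_valued", tags.all (fun t => t.2.2))]

-- ===== PRECONDITION & SPEC =====
def Spec_compute_symmetry_tags_from_pauli_strings (pauli_strings : List String) (out : List (String × Bool)) : Prop := out = compute_symmetry_tags_from_pauli_strings_alt pauli_strings
instance (pauli_strings : List String) (out : List (String × Bool)) : Decidable (Spec_compute_symmetry_tags_from_pauli_strings pauli_strings out) := by unfold Spec_compute_symmetry_tags_from_pauli_strings; infer_instance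

-- ===== CLAIM (what is proved, stated in full; the proofs are below) =====
def Claim_equal_compute_symmetry_tags_from_pauli_strings : Prop := ∀ (pauli_strings : List String), Dom_compute_symmetry_tags_from_pauli_strings pauli_strings → Spec_compute_symmetry_tags_from_pauli_strings pauli_strings (compute_symmetry_tags_from_pauli_strings pauli_strings)

-- ===== LEMMAS AND PROOFS =====
-- A's fold carries each flag as 'initial && (every element so far passes its test)'
theorem pvFoldA_eq (l : List String) (p z r : Bool) :
    l.foldl pvStepA (p, z, r) =
      (p && l.all (fun ps => PySem.Str.count ps "X" == PySem.Str.count ps "Y"),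
       z && l.all (fun ps =>
         (PySem.Str.count ps "X" + PySem.Str.count ps "Y" + PySem.Str.count ps "Z") % 2 == 0),
       r && l.all (fun ps => PySem.Str.count ps "Y" % 2 == 0)) := by
  induction l generalizing p z r with
  | nil => simp
  | cons hd tl ih =>
    simp only [List.foldl_cons, List.all_cons, pvStepA, ih, Prod.mk.injEq,
      PySem.Str.count_eq, ne_eq]
    refine ⟨?_, ?_, ?_⟩
    · by_cases h : PySem.Chars.count hd.toList ['X'] = PySem.Chars.count hd.toList ['Y'] <;>
        simp [h, Bool.and_left_comm]
    · rcases Nat.mod_two_eq_zero_or_one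
        (PySem.Chars.count hd.toList ['X'] + PySem.Chars.count hd.toList ['Y'] +
          PySem.Chars.count hd.toList ['Z']) with h | h <;>
        simp [h, Bool.and_left_comm]
    · rcases Nat.mod_two_eq_zero_or_one (PySem.Chars.count hd.toList ['Y']) with h | h <;>
        simp [h, Bool.and_left_comm]

-- PySem has no lemma for single-character substring counts, so we derive one:
-- for a one-character pattern the fuel-driven non-overlapping scan is List.count.
theorem pvCountGo_singleton (c : Char) (s : List Char) (fuel acc : Nat)
    (h : s.length ≤ fuel) :
    PySem.Chars.count.go [c] fuel s acc = acc + s.count c := by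
  induction s generalizing fuel acc with
  | nil => cases fuel <;> simp [PySem.Chars.count.go]
  | cons hd tl ih =>
    cases fuel with
    | zero => simp at h
    | succ fuel =>
      have h' : tl.length ≤ fuel := by simpa using h
      have hgo : PySem.Chars.count.go [c] (fuel + 1) (hd :: tl) acc
          = if [c].isPrefixOf (hd :: tl) = true then
              PySem.Chars.count.go [c] fuel ((hd :: tl).drop [c].length) (acc + 1)
            else PySem.Chars.count.go [c] fuel tl acc := rfl
      by_cases hc : c = hd
      · subst hc
        rw [hgo, if_pos (by simp [List.isPrefixOf])]
        simp only [List.length_cons, List.length_nil, List.drop_succ_cons, List.drop_zero]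
        rw [ih fuel (acc + 1) h']
        simp [List.count_cons_self]
        omega
      · rw [hgo, if_neg (by simp [List.isPrefixOf, hc])]
        rw [ih fuel acc h']
        simp [List.count_cons]
        exact Ne.symm hc

theorem pvCharsCount_singleton (s : List Char) (c : Char) :
    PySem.Chars.count s [c] = s.count c := by
  simp [PySem.Chars.count, pvCountGo_singleton c s s.length 0 le_rfl]

-- B's char fold computes the X−Y balance and the two parities
theorem pvCharFold (cs : List Char) (d : Int) (w y : Bool) :
    cs.foldl pvCharStep (d, w, y) =
      (d + (cs.count 'X' : Int) - (cs.count 'Y' : Int),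
       w ^^ (cs.count 'X' + cs.count 'Y' + cs.count 'Z').bodd,
       y ^^ (cs.count 'Y').bodd) := by
  induction cs generalizing d w y with
  | nil => simp
  | cons hd tl ih =>
    simp only [List.foldl_cons, pvCharStep]
    by_cases hX : hd = 'X'
    · subst hX
      rw [ih]
      simp [Nat.bodd_add]
      omega
    · by_cases hY : hd = 'Y'
      · subst hY
        rw [ih]
        simp [hX, Nat.bodd_add]
        omega
      · by_cases hZ : hd = 'Z'
        · subst hZ
          rw [ih]
          simp [hX, hY, Nat.bodd_add]
        · simp only [hX, hY, hZ, if_false]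
          rw [ih]
          simp [hX, hY, hZ]

-- per-string: B's state-machine tags equal A's count-based tests
theorem pvStringTags_eq (ps : String) :
    pvStringTags ps =
      ((PySem.Chars.count ps.toList ['X'] == PySem.Chars.count ps.toList ['Y']),
       ((PySem.Chars.count ps.toList ['X'] + PySem.Chars.count ps.toList ['Y'] +
           PySem.Chars.count ps.toList ['Z']) % 2 == 0),
       (PySem.Chars.count ps.toList ['Y'] % 2 == 0)) := by
  simp only [pvStringTags, pvCharFold, pvCharsCount_singleton, Bool.false_xor, Prod.mk.injEq]
  refine ⟨?_, ?_, ?_⟩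
  · rw [Bool.eq_iff_iff]
    simp only [beq_iff_eq]
    omega
  · cases hb : (ps.toList.count 'X' + ps.toList.count 'Y' + ps.toList.count 'Z').bodd <;>
      simp [Nat.mod_two_of_bodd, hb]
  · cases hb : (ps.toList.count 'Y').bodd <;> simp [Nat.mod_two_of_bodd, hb]

-- ===== VERDICT (by name: the statement is the Claim_ definition above) =====
theorem compute_symmetry_tags_from_pauli_strings_spec : Claim_equal_compute_symmetry_tags_from_pauli_strings := by
  intro pauli_strings _
  unfold Spec_compute_symmetry_tags_from_pauli_strings
  simp [compute_symmetry_tags_from_pauli_strings, compute_symmetry_tags_from_pauli_strings_alt,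
    pvFoldA_eq, List.all_map, Function.comp_def, pvStringTags_eq]
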